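-- pv_equiv track=rewrite | github.com/foone/discord_quote | discord_quote.py | assign_sides
-- ===== SOURCE A (Python) =====
-- def assign_sides(speakers, right_side=None):
-- 	# the goal here is to be smart about who is picked for the right user
-- 	sides={}
--
-- 	available_sides=['later-left','left','right']
-- 	if right_side in speakers:
-- 		sides[right_side] = 'right'
-- 		available_sides=['later-left','left']
--
-- 	for speaker in speakers:
-- 		if speaker not in sides:
-- 			side=available_sides.pop()
-- 			if not available_sides:
-- 				available_sides=['later-left']
-- 			sides[speaker]=side
-- 	return sides
-- ===== SOURCE B (Python) =====
-- def assign_sides(speakers, right_side=None):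
--     # two-pass positional version: dedup once, then assign labels by index
--     order = []
--     seen = set()
--     for s in speakers:
--         if s not in seen:
--             seen.add(s)
--             order.append(s)
--     if right_side in seen:
--         head = [(right_side, 'right')]
--         rest = [s for s in order if s != right_side]
--         labels = ['left']
--     else:
--         head = []
--         rest = order
--         labels = ['right', 'left']
--     tail = [(s, labels[i] if i < len(labels) else 'later-left')
--             for i, s in enumerate(rest)]
--     return dict(head + tail)
-- ===== Notes on version B (the rewrite author's own statement) =====
-- stated objective: simpler
-- what changed: Replaces A's stateful loop over a mutable pop-and-refill stack of available sides with a dedup pass followed by positional assignment: labels are picked by index in the deduplicated speaker list, no mutable side stack.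
import Mathlib
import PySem

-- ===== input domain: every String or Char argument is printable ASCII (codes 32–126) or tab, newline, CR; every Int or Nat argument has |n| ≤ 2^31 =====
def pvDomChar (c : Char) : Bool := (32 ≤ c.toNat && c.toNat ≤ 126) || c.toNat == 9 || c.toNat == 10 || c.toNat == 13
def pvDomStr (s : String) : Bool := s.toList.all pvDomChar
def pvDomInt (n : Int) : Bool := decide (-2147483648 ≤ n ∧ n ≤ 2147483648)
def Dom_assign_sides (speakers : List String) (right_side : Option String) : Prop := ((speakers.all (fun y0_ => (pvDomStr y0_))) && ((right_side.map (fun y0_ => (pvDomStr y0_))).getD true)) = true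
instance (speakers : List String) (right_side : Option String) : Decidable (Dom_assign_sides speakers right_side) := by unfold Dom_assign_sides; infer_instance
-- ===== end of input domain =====

-- B replaces A's mutable pop-and-refill stack of sides with a dedup pass plus
-- positional (index-based) label assignment; objective: simpler decomposition.

-- ===== PORT A =====
-- one step of A's for-loop: state = (sides dict, available_sides list);
-- 'available_sides.pop()' (pop last) is transliterated by matching on the
-- reversed list, exact for Python's list.pop() on a nonempty list (A's
-- available list is never empty; the [] branch is unreachable dead state).
def assign_sides_step (st : PySem.Dict String String × List String) (speaker : String) :
    PySem.Dict String String × List String :=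
  let (sides, available) := st
  if sides.contains speaker then st
  else
    match available.reverse with
    | [] => st
    | side :: restRev =>
      let rest := restRev.reverse
      let available' := if rest = [] then ["later-left"] else rest
      (sides.insert speaker side, available')

def assign_sides (speakers : List String) (right_side : Option String) : List (String × String) :=
  let sides : PySem.Dict String String := PySem.Dict.empty
  let available : List String := ["later-left", "left", "right"]
  -- 'if right_side in speakers': None is never an element of a list of strings
  let (sides, available) :=
    match right_side with
    | some r => if r ∈ speakers then (sides.insert r "right", ["later-left", "left"]) else (sides, available)
    | none => (sides, available)
  (speakers.foldl assign_sides_step (sides, available)).1.items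

-- ===== PORT B =====
-- labels[i] if i < len(labels) else 'later-left'
def assign_sides_label (labels : List String) (i : Nat) : String :=
  if h : i < labels.length then labels[i] else "later-left"

def assign_sides_alt (speakers : List String) (right_side : Option String) : List (String × String) :=
  let order := speakers.foldl (fun acc s => if s ∈ acc then acc else acc ++ [s]) []
  let (head, rest, labels) :=
    match right_side with
    | some r =>
      if r ∈ order then ([(r, "right")], order.filter (fun s => s ≠ r), ["left"])
      else ([], order, ["right", "left"])
    | none => ([], order, ["right", "left"])
  let tail := (rest.zipIdx).map (fun p => (p.1, assign_sides_label labels p.2))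
  head ++ tail

-- ===== PRECONDITION & SPEC =====
def Spec_assign_sides (speakers : List String) (right_side : Option String) (out : List (String × String)) : Prop := out = assign_sides_alt speakers right_side
instance (speakers : List String) (right_side : Option String) (out : List (String × String)) : Decidable (Spec_assign_sides speakers right_side out) := by unfold Spec_assign_sides; infer_instance

-- ===== CLAIM (what is proved, stated in full; the proofs are below) =====
def Claim_equal_assign_sides : Prop := ∀ (speakers : List String) (right_side : Option String), Dom_assign_sides speakers right_side → Spec_assign_sides speakers right_side (assign_sides speakers right_side)

-- ===== LEMMAS AND PROOFS =====

-- ordered dedup of xs, skipping elements already in K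
def dedupEx (K : List String) : List String → List String
  | [] => []
  | s :: rest => if s ∈ K then dedupEx K rest else s :: dedupEx (s :: K) rest

theorem dedupEx_congr (K K' : List String) (h : ∀ s, s ∈ K ↔ s ∈ K') :
    ∀ xs, dedupEx K xs = dedupEx K' xs := by
  intro xs
  induction xs generalizing K K' with
  | nil => rfl
  | cons x t ih =>
    simp only [dedupEx]
    by_cases hx : x ∈ K
    · rw [if_pos hx, if_pos ((h x).mp hx), ih K K' h]
    · rw [if_neg hx, if_neg (fun hx' => hx ((h x).mpr hx'))]
      rw [ih (x :: K) (x :: K') (by intro s; simp [h s])]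

theorem mem_dedupEx (s : String) : ∀ (xs K : List String), s ∈ dedupEx K xs ↔ s ∈ xs ∧ s ∉ K := by
  intro xs
  induction xs with
  | nil => simp [dedupEx]
  | cons x t ih =>
    intro K
    simp only [dedupEx]
    by_cases hx : x ∈ K
    · rw [if_pos hx, ih]
      constructor
      · rintro ⟨hs, hK⟩; exact ⟨List.mem_cons_of_mem _ hs, hK⟩
      · rintro ⟨hs, hK⟩
        rcases List.mem_cons.mp hs with rfl | hs
        · exact absurd hx hK
        · exact ⟨hs, hK⟩
    · rw [if_neg hx]
      constructor
      · intro hmem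
        rcases List.mem_cons.mp hmem with rfl | hmem
        · exact ⟨List.mem_cons_self, hx⟩
        · rcases (ih (x :: K)).mp hmem with ⟨hs, hK⟩
          exact ⟨List.mem_cons_of_mem _ hs, fun h => hK (List.mem_cons_of_mem _ h)⟩
      · rintro ⟨hs, hK⟩
        rcases List.mem_cons.mp hs with rfl | hs
        · exact List.mem_cons_self
        · by_cases hsx : s = x
          · subst hsx; exact List.mem_cons_self
          · exact List.mem_cons_of_mem _ ((ih (x :: K)).mpr ⟨hs, by simp [hsx, hK]⟩)

theorem foldl_dedup_eq (xs : List String) : ∀ acc,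
    xs.foldl (fun acc s => if s ∈ acc then acc else acc ++ [s]) acc = acc ++ dedupEx acc xs := by
  induction xs with
  | nil => simp [dedupEx]
  | cons x t ih =>
    intro acc
    simp only [List.foldl_cons, dedupEx]
    by_cases hx : x ∈ acc
    · rw [if_pos hx, if_pos hx, ih]
    · rw [if_neg hx, if_neg hx, ih]
      rw [dedupEx_congr (acc ++ [x]) (x :: acc) (by intro s; simp [or_comm]) t]
      simp

theorem dedupEx_cons_filter (r : String) : ∀ (xs K : List String),
    dedupEx (r :: K) xs = (dedupEx K xs).filter (fun s => s ≠ r) := by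
  intro xs
  induction xs with
  | nil => simp [dedupEx]
  | cons x t ih =>
    intro K
    simp only [dedupEx]
    by_cases hx : x ∈ K
    · rw [if_pos (List.mem_cons_of_mem _ hx), if_pos hx, ih]
    · by_cases hxr : x = r
      · subst hxr
        rw [if_pos List.mem_cons_self, if_neg hx, ih K]
        simp [List.filter_filter]
      · rw [if_neg (by simp [hx, hxr]), if_neg hx,
            dedupEx_congr (x :: r :: K) (r :: x :: K)
              (by intro s; constructor <;> (intro h; simp at h ⊢; tauto)) t,
            ih (x :: K)]
        simp [hxr]

-- pairing of A's available stack with B's label list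
def availRel (av labels : List String) : Prop :=
  (av = ["later-left", "left", "right"] ∧ labels = ["right", "left"]) ∨
  (av = ["later-left", "left"] ∧ labels = ["left"]) ∨
  (av = ["later-left"] ∧ labels = [])

theorem label_succ (labels : List String) (i : Nat) :
    assign_sides_label labels (i + 1) = assign_sides_label labels.tail i := by
  cases labels with
  | nil => simp [assign_sides_label]
  | cons a t =>
    simp only [assign_sides_label, List.tail_cons, List.length_cons]
    by_cases h : i < t.length
    · rw [dif_pos (by omega), dif_pos h]; simp
    · rw [dif_neg (by omega), dif_neg h]

theorem zipIdx_map_label_shift (t labels : List String) : ∀ n,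
    ((t.zipIdx (n + 1)).map (fun p => (p.1, assign_sides_label labels p.2)))
      = (t.zipIdx n).map (fun p => (p.1, assign_sides_label labels.tail p.2)) := by
  induction t generalizing labels with
  | nil => intro n; rfl
  | cons x xs ih =>
    intro n
    simp only [List.zipIdx_cons, List.map_cons]
    rw [label_succ labels n, ih labels (n + 1)]

-- main loop invariant: A's fold appends the freshly-deduped speakers labelled positionally
theorem contains_insert_iff (d : PySem.Dict String String) (K : List String) (s v : String)
    (hK : ∀ x, d.contains x = true ↔ x ∈ K) :
    ∀ x, (d.insert s v).contains x = true ↔ x ∈ s :: K := by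
  intro x
  rw [PySem.Dict.contains_insert]
  simp [hK x, List.mem_cons]

theorem fold_eq_dedup : ∀ (speakers K : List String) (d : PySem.Dict String String)
    (av labels : List String),
    availRel av labels →
    (∀ s, d.contains s = true ↔ s ∈ K) →
    d.keys.Nodup →
    (speakers.foldl assign_sides_step (d, av)).1.items
      = d.items ++ ((dedupEx K speakers).zipIdx).map (fun p => (p.1, assign_sides_label labels p.2)) := by
  intro speakers
  induction speakers with
  | nil => intro K d av labels _ _ _; simp [dedupEx]
  | cons s t ih =>
    intro K d av labels hrel hK hnd
    simp only [List.foldl_cons, dedupEx]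
    by_cases hs : s ∈ K
    · have hc : d.contains s = true := (hK s).mpr hs
      rw [if_pos hs]
      have hstep : assign_sides_step (d, av) s = (d, av) := by
        simp [assign_sides_step, hc]
      rw [hstep, ih K d av labels hrel hK hnd]
    · have hc : d.contains s = false := by
        cases h : d.contains s
        · rfl
        · exact absurd ((hK s).mp h) hs
      rw [if_neg hs]
      rcases hrel with ⟨rfl, rfl⟩ | ⟨rfl, rfl⟩ | ⟨rfl, rfl⟩
      · have hstep : assign_sides_step (d, ["later-left", "left", "right"]) s
            = (d.insert s "right", ["later-left", "left"]) := by
          simp [assign_sides_step, hc]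
        rw [hstep,
            ih (s :: K) (d.insert s "right") _ ["left"] (by unfold availRel; simp)
              (contains_insert_iff d K s _ hK)
              (PySem.Dict.nodup_keys_insert d _ _ hnd),
            PySem.Dict.items_insert_of_not_contains _ _ hc]
        simp only [List.zipIdx_cons, List.map_cons, zipIdx_map_label_shift]
        simp [assign_sides_label]
      · have hstep : assign_sides_step (d, ["later-left", "left"]) s
            = (d.insert s "left", ["later-left"]) := by
          simp [assign_sides_step, hc]
        rw [hstep,
            ih (s :: K) (d.insert s "left") _ [] (by unfold availRel; simp)
              (contains_insert_iff d K s _ hK)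
              (PySem.Dict.nodup_keys_insert d _ _ hnd),
            PySem.Dict.items_insert_of_not_contains _ _ hc]
        simp only [List.zipIdx_cons, List.map_cons, zipIdx_map_label_shift]
        simp [assign_sides_label]
      · have hstep : assign_sides_step (d, ["later-left"]) s
            = (d.insert s "later-left", ["later-left"]) := by
          simp [assign_sides_step, hc]
        rw [hstep,
            ih (s :: K) (d.insert s "later-left") _ [] (by unfold availRel; simp)
              (contains_insert_iff d K s _ hK)
              (PySem.Dict.nodup_keys_insert d _ _ hnd),
            PySem.Dict.items_insert_of_not_contains _ _ hc]
        simp only [List.zipIdx_cons, List.map_cons, zipIdx_map_label_shift]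
        simp [assign_sides_label]

-- ===== VERDICT (by name: the statement is the Claim_ definition above) =====
theorem assign_sides_spec : Claim_equal_assign_sides := by
  intro speakers right_side _
  unfold Spec_assign_sides assign_sides assign_sides_alt
  rw [foldl_dedup_eq speakers []]
  simp only [List.nil_append]
  cases right_side with
  | none =>
    rw [fold_eq_dedup speakers [] PySem.Dict.empty _ ["right", "left"]
        (by unfold availRel; simp) (by intro s; simp) (by simp)]
    simp [PySem.Dict.empty]
  | some r =>
    by_cases hr : r ∈ speakers
    · have hro : r ∈ dedupEx [] speakers := by rw [mem_dedupEx]; simp [hr]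
      simp only [if_pos hr, if_pos hro]
      rw [fold_eq_dedup speakers [r] (PySem.Dict.empty.insert r "right") _ ["left"]
          (by unfold availRel; simp)
          (by intro s; rw [PySem.Dict.contains_insert]; simp)
          (by exact PySem.Dict.nodup_keys_insert _ _ _ (by simp))]
      rw [← dedupEx_cons_filter r speakers [],
          PySem.Dict.items_insert_of_not_contains _ _ (by simp)]
      simp [PySem.Dict.empty]
    · have hro : r ∉ dedupEx [] speakers := by rw [mem_dedupEx]; simp [hr]
      simp only [if_neg hr, if_neg hro]
      rw [fold_eq_dedup speakers [] PySem.Dict.empty _ ["right", "left"]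
          (by unfold availRel; simp) (by intro s; simp) (by simp)]
      simp [PySem.Dict.empty]
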